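-- pv_equiv track=rewrite | github.com/adityajain1095/interview-practice | ctci/moderate.py | moderate_six
-- ===== SOURCE A (Python) =====
-- def moderate_six(num):
--     n = len(str(num))
--     string = ''
--     if n < 3:
--         if n == 3:
--             string += 'hundred' + 'tens' + 'one'
--         elif n == 2:
--             if str(num)[n-1] < '2':
--                 string += 'special'
--             else:
--                 string += 'tens' + 'one'
--         else:
--             string += 'one'
--     else:
--         for i in range(0,n,3):
--             k = i+3
--             if k > n:
--                 if k - n == 1:
--                     k = 2
--                 else:
--                     k = 1
--             k = k%3
--             if k == 0:
--                 string += 'hundred' + 'tens' + 'one'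
--             elif k == 2:
--                 if str(num)[n-1] < '2':
--                     string += 'special'
--                 else:
--                     string += 'tens' + 'one'
--             else:
--                 string += 'one'
--     return string
-- ===== SOURCE B (Python) =====
-- def moderate_six(num):
--     s = str(num)
--     n = len(s)
--     result = 'hundredtensone' * (n // 3)
--     r = n % 3
--     if r == 2:
--         result += 'special' if s[-1] < '2' else 'tensone'
--     elif r == 1:
--         result += 'one'
--     return result
-- ===== Notes on version B (the rewrite author's own statement) =====
-- stated objective: simpler
-- what changed: Replaces A's stepped index loop with its per-iteration k-arithmetic by a closed form: the full-group token repeated once per complete three-digit group (string repetition), plus a remainder token chosen by the leftover digit count and a single last-character test.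
import Mathlib
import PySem

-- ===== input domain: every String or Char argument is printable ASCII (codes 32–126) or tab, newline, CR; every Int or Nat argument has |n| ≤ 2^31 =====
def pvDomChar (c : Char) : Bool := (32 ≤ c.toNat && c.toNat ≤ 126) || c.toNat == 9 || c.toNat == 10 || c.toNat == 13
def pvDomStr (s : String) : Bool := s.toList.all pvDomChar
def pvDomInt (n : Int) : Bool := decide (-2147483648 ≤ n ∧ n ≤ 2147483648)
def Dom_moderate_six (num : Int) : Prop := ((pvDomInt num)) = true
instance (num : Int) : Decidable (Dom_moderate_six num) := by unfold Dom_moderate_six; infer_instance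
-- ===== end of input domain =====

-- B replaces A's per-group loop with a closed form: 'hundredtensone' repeated n//3 times plus a
-- remainder token chosen by n % 3 (objective: simpler).

-- ===== PORT A =====
-- literal port of A; the string is built as a List Char (PySem.Chars side) and packed with String.ofList
def moderate_six (num : Int) : String :=
  let cs := PySem.Int.toChars num                -- str(num)
  let n : Int := cs.length                       -- n = len(str(num))
  let s0 : List Char := []                       -- string = ''
  let out :=
    if n < 3 then
      if n = 3 then s0 ++ "hundredtensone".toList
      else if n = 2 then
        if PySem.List.pyGetD cs (n - 1) ' ' < '2' then s0 ++ "special".toList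
        else s0 ++ "tensone".toList
      else s0 ++ "one".toList
    else
      (PySem.List.pyRange 0 n 3).foldl (fun acc i =>
        let k := i + 3
        let k := if k > n then (if k - n = 1 then (2 : Int) else 1) else k
        let k := PySem.Int.mod k 3
        if k = 0 then acc ++ "hundredtensone".toList
        else if k = 2 then
          if PySem.List.pyGetD cs (n - 1) ' ' < '2' then acc ++ "special".toList
          else acc ++ "tensone".toList
        else acc ++ "one".toList) s0
  String.ofList out

-- ===== PORT B =====
def moderate_six_alt (num : Int) : String :=
  let cs := PySem.Int.toChars num                -- s = str(num)
  let n : Int := cs.length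
  -- result = 'hundredtensone' * (n // 3)
  let result := (List.replicate (PySem.Int.floordiv n 3).toNat "hundredtensone".toList).flatten
  let r := PySem.Int.mod n 3
  let out :=
    if r = 2 then
      result ++ (if PySem.List.pyGetD cs (-1) ' ' < '2' then "special".toList else "tensone".toList)
    else if r = 1 then result ++ "one".toList
    else result
  String.ofList out

-- ===== PRECONDITION & SPEC =====
def Spec_moderate_six (num : Int) (out : String) : Prop := out = moderate_six_alt num
instance (num : Int) (out : String) : Decidable (Spec_moderate_six num out) := by unfold Spec_moderate_six; infer_instance

-- ===== CLAIM (what is proved, stated in full; the proofs are below) =====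
def Claim_equal_moderate_six : Prop := ∀ (num : Int), Dom_moderate_six num → Spec_moderate_six num (moderate_six num)

-- ===== LEMMAS AND PROOFS =====

-- str(num) is never the empty string
theorem pv_toChars_ne_nil (num : Int) : PySem.Int.toChars num ≠ [] := by
  unfold PySem.Int.toChars
  split
  · simp
  · have : 0 < (Nat.toDigits 10 num.toNat).length := Nat.length_toDigits_pos
    intro h; simp [h] at this

-- Python index -1 reads the same character as index (length - 1)
theorem pv_pyGetD_neg_one {α : Type} (xs : List α) (d : α) (h : xs ≠ []) :
    PySem.List.pyGetD xs (-1) d = PySem.List.pyGetD xs ((xs.length : Int) - 1) d := by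
  have hl : 0 < xs.length := List.length_pos_iff.mpr h
  simp only [PySem.List.pyGetD, PySem.List.pyGet?, PySem.List.pyIdx?]
  rw [if_neg (by omega), if_pos (by omega), if_pos (by omega), if_pos (by omega)]
  have : xs.length - (-(-1 : Int)).toNat = ((xs.length : Int) - 1).toNat := by omega
  rw [this]

theorem pv_flatMap_replicate {α : Type} (q : Nat) (h : Nat → List α) (L : List α)
    (hh : ∀ k < q, h k = L) : (List.range q).flatMap h = (List.replicate q L).flatten := by
  induction q with
  | zero => simp
  | succ q ih =>
    rw [List.range_succ, List.flatMap_append, ih (fun k hk => hh k (by omega)),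
        List.replicate_succ', List.flatten_append]
    simp [hh q (by omega)]

-- closed form of A's loop: for n ≥ 3 it yields 'hundredtensone' * (n // 3) plus the n % 3 remainder token
theorem pv_main (n : Int) (t : List Char) (hn : 3 ≤ n) :
    (PySem.List.pyRange 0 n 3).foldl (fun acc i =>
        let k := i + 3
        let k := if k > n then (if k - n = 1 then (2 : Int) else 1) else k
        let k := PySem.Int.mod k 3
        if k = 0 then acc ++ "hundredtensone".toList
        else if k = 2 then acc ++ t
        else acc ++ "one".toList) [] =
      (List.replicate (PySem.Int.floordiv n 3).toNat "hundredtensone".toList).flatten ++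
        (if PySem.Int.mod n 3 = 2 then t
         else if PySem.Int.mod n 3 = 1 then "one".toList else []) := by
  have hbody : (fun (acc : List Char) (i : Int) =>
        let k := i + 3
        let k := if k > n then (if k - n = 1 then (2 : Int) else 1) else k
        let k := PySem.Int.mod k 3
        if k = 0 then acc ++ "hundredtensone".toList
        else if k = 2 then acc ++ t
        else acc ++ "one".toList)
      = (fun acc i => acc ++
        (let k := i + 3
         let k := if k > n then (if k - n = 1 then (2 : Int) else 1) else k
         let k := PySem.Int.mod k 3
         if k = 0 then "hundredtensone".toList
         else if k = 2 then t
         else "one".toList)) := by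
    funext acc i; simp only []; split_ifs <;> rfl
  rw [hbody, PySem.List.foldl_append_eq_flatMap,
      PySem.List.pyRange_of_pos (a := 0) (b := n) (s := 3) (by omega),
      List.flatMap_map]
  rw [if_pos (by omega : (0:Int) < n)]
  have hmod : PySem.Int.mod n 3 = n % 3 := PySem.Int.mod_eq_emod_of_pos (by omega)
  have hdiv : PySem.Int.floordiv n 3 = n / 3 := PySem.Int.floordiv_eq_ediv_of_pos (by omega)
  rw [hmod, hdiv]
  set q : Nat := (n / 3).toNat with hq
  set r : Int := n % 3 with hr
  have hnq : n = 3 * (q : Int) + r := by omega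
  have hr3 : 0 ≤ r ∧ r < 3 := ⟨Int.emod_nonneg n (by omega), Int.emod_lt_of_pos n (by omega)⟩
  have hfull : ∀ k < q, ((fun k : Nat =>
        (let k' := (0 + 3 * (k:Int)) + 3
         let k' := if k' > n then (if k' - n = 1 then (2 : Int) else 1) else k'
         let k' := PySem.Int.mod k' 3
         if k' = 0 then "hundredtensone".toList
         else if k' = 2 then t
         else "one".toList)) k) = "hundredtensone".toList := by
    intro k hk
    have h1 : ¬ ((0 + 3 * (k:Int)) + 3 > n) := by omega
    have h2 : PySem.Int.mod ((0 + 3 * (k:Int)) + 3) 3 = 0 := by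
      rw [PySem.Int.mod_eq_emod_of_pos (by omega)]; omega
    simp only [h1, if_false, h2]
    simp
  rcases eq_or_ne r 0 with h0 | h0
  · have hcount : ((n - 0 + 3 - 1) / 3).toNat = q := by omega
    rw [hcount, pv_flatMap_replicate q _ _ hfull]
    simp [h0]
  · have hcount : ((n - 0 + 3 - 1) / 3).toNat = q + 1 := by omega
    rw [hcount, List.range_succ, List.flatMap_append,
        pv_flatMap_replicate q _ _ hfull]
    have hgt : (0 + 3 * (q:Int)) + 3 > n := by omega
    simp only [List.flatMap_cons, List.flatMap_nil, List.append_nil, hgt, if_true]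
    rcases (by omega : r = 1 ∨ r = 2) with h1 | h2
    · have hne : ¬ ((0 + 3 * (q:Int)) + 3 - n = 1) := by omega
      simp only [hne, if_false]
      simp [h1]
    · have heq : ((0 + 3 * (q:Int)) + 3 - n = 1) := by omega
      simp only [heq, if_true]
      simp [h2]

-- ===== VERDICT (by name: the statement is the Claim_ definition above) =====
theorem moderate_six_spec : Claim_equal_moderate_six := by
  intro num _
  unfold Spec_moderate_six moderate_six moderate_six_alt
  simp only []
  have hne := pv_toChars_ne_nil num
  set cs := PySem.Int.toChars num with hcs
  have hN : 1 ≤ cs.length := List.length_pos_iff.mpr hne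
  rw [pv_pyGetD_neg_one cs ' ' hne]
  congr 1
  set n : Int := (cs.length : Int) with hn
  rcases (by omega : n = 1 ∨ n = 2 ∨ 3 ≤ n) with h1 | h2 | h3
  · rw [h1]
    simp
  · rw [h2]
    have e1 : PySem.Int.mod (2 : Int) 3 = 2 := by decide
    have e2 : PySem.Int.floordiv (2 : Int) 3 = 0 := by decide
    simp only [e1, e2]
    norm_num
  · rw [if_neg (by omega : ¬ n < 3)]
    set t : List Char :=
      (if PySem.List.pyGetD cs (n - 1) ' ' < '2' then "special".toList else "tensone".toList) with ht
    have hbody : (fun (acc : List Char) (i : Int) =>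
        if PySem.Int.mod (if i + 3 > n then if i + 3 - n = 1 then 2 else 1 else i + 3) 3 = 0 then
          acc ++ "hundredtensone".toList
        else if PySem.Int.mod (if i + 3 > n then if i + 3 - n = 1 then (2 : Int) else 1 else i + 3) 3 = 2 then
          (if PySem.List.pyGetD cs (n - 1) ' ' < '2' then acc ++ "special".toList
           else acc ++ "tensone".toList)
        else acc ++ "one".toList)
      = (fun acc i =>
        let k := i + 3
        let k := if k > n then (if k - n = 1 then (2 : Int) else 1) else k
        let k := PySem.Int.mod k 3
        if k = 0 then acc ++ "hundredtensone".toList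
        else if k = 2 then acc ++ t
        else acc ++ "one".toList) := by
      funext acc i; simp only [ht]; split_ifs <;> rfl
    rw [hbody, pv_main n t h3]
    split_ifs <;> simp
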